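-- pv_equiv track=rewrite | github.com/tkgaolol/brushcode_juejin | 18.py | solution
-- ===== SOURCE A (Python) =====
-- def solution(m: int, n: int, a: list) -> int:
--     # 定义方向：上、下、左、右
--     directions = [(0, 1), (0, -1), (1, 0), (-1, 0)]
--     visited = set()
--     max_steps = [0]  # 使用列表存储最大步数，便于在递归中修改
--
--     def is_valid(x, y):
--         return 0 <= x < m and 0 <= y < n
--
--     def dfs(x, y, prev_height, is_up_next, steps):
--         max_steps[0] = max(max_steps[0], steps)
--
--         for dx, dy in directions:
--             next_x, next_y = x + dx, y + dy
--
--             if (is_valid(next_x, next_y) and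
--                 (next_x, next_y) not in visited):
--
--                 curr_height = a[next_x][next_y]
--                 # 检查是否符合上坡/下坡的要求
--                 if (is_up_next and curr_height > prev_height) or \
--                    (not is_up_next and curr_height < prev_height):
--                     visited.add((next_x, next_y))
--                     dfs(next_x, next_y, curr_height, not is_up_next, steps + 1)
--                     visited.remove((next_x, next_y))
--
--     # 从每个点开始尝试
--     for i in range(m):
--         for j in range(n):
--             visited.add((i, j))
--             # 尝试从当前点开始向上走
--             dfs(i, j, a[i][j], True, 0)
--             # 尝试从当前点开始向下走
--             dfs(i, j, a[i][j], False, 0)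
--             visited.remove((i, j))
--
--     return max_steps[0]
-- ===== SOURCE B (Python) =====
-- def solution(m: int, n: int, a: list) -> int:
--     # Layered BFS over partial-path states instead of a recursive DFS:
--     # each state is (x, y, height, next_is_up, frozen visited set); the answer
--     # is the number of layers that still have at least one extendable state.
--     directions = ((0, 1), (0, -1), (1, 0), (-1, 0))
--
--     def step(states):
--         nxt = []
--         for (x, y, ph, up, vis) in states:
--             for dx, dy in directions:
--                 nx, ny = x + dx, y + dy
--                 if 0 <= nx < m and 0 <= ny < n and (nx, ny) not in vis:
--                     h = a[nx][ny]
--                     if (h > ph) if up else (h < ph):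
--                         nxt.append((nx, ny, h, not up, vis | frozenset([(nx, ny)])))
--         return nxt
--
--     frontier = []
--     for i in range(m):
--         for j in range(n):
--             start = frozenset([(i, j)])
--             frontier.append((i, j, a[i][j], True, start))
--             frontier.append((i, j, a[i][j], False, start))
--
--     length = 0
--     nxt = step(frontier)
--     while nxt:
--         length += 1
--         nxt = step(nxt)
--     return length
-- ===== Notes on version B (the rewrite author's own statement) =====
-- stated objective: alternative
-- what changed: Replaces the recursive DFS with a mutable max box by an iterative layered breadth-first search over partial-path states (cell, height, direction flag, visited set): each iteration extends every surviving path by one step and the answer is the number of non-empty layers.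
import Mathlib
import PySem

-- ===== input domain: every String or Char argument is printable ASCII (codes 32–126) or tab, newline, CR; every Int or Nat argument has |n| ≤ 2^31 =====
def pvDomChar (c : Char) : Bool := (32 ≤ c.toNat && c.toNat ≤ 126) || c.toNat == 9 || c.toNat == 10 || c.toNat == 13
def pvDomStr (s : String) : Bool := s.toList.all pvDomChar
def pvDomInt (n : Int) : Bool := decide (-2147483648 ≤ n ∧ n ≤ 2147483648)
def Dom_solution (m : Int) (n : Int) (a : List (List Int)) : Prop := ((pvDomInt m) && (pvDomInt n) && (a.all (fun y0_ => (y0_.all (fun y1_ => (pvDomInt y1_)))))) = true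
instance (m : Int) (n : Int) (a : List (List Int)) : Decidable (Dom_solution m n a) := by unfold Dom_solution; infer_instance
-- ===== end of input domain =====

-- B replaces A's recursive DFS with a mutable max box by an iterative layered
-- breadth-first search over partial-path states; the answer is the number of
-- non-empty layers (objective: alternative, same search space).

-- ===== PORT A =====

-- directions = [(0, 1), (0, -1), (1, 0), (-1, 0)]
def pvDirs : List (Int × Int) := [(0, 1), (0, -1), (1, 0), (-1, 0)]

-- a[x][y] as a total function; under Pre_solution every access is in range, so the defaults are never used
def pvCell (a : List (List Int)) (x y : Int) : Int :=
  (PySem.List.pyGet? ((PySem.List.pyGet? a x).getD []) y).getD 0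

-- A's dfs: `visited` is restored after each recursive call in Python, so passing the
-- set by value is exact; `ms` is the max_steps[0] box, threaded through and returned.
-- `fuel` only makes the recursion structural: each call adds one cell of the m×n grid
-- to `visited`, so the depth never exceeds m*n and the initial fuel m*n+1 is never exhausted.
def pvDfsA (m n : Int) (a : List (List Int)) :
    Nat → Int → Int → Int → Bool → Int → PySem.Set (Int × Int) → Int → Int
  | 0, _, _, _, _, steps, _, ms => max ms steps
  | fuel + 1, x, y, ph, up, steps, vis, ms =>
    let ms := max ms steps
    pvDirs.foldl (fun ms d =>
      let nx := x + d.1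
      let ny := y + d.2
      if (0 ≤ nx ∧ nx < m ∧ 0 ≤ ny ∧ ny < n) ∧ ¬ PySem.Set.contains vis (nx, ny) then
        let ch := pvCell a nx ny
        if (up && decide (ph < ch)) || (!up && decide (ch < ph)) then
          pvDfsA m n a fuel nx ny ch (!up) (steps + 1) (PySem.Set.add vis (nx, ny)) ms
        else ms
      else ms) ms

def solution (m : Int) (n : Int) (a : List (List Int)) : Int :=
  (PySem.List.pyRange 0 m 1).foldl (fun ms i =>
    (PySem.List.pyRange 0 n 1).foldl (fun ms j =>
      let vis : PySem.Set (Int × Int) := PySem.Set.ofList [(i, j)]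
      let h := pvCell a i j
      let ms := pvDfsA m n a (m.toNat * n.toNat + 1) i j h true 0 vis ms
      pvDfsA m n a (m.toNat * n.toNat + 1) i j h false 0 vis ms) ms) 0

-- ===== PORT B =====

-- B's step: all one-move extensions of one state (x, y, prev_height, up_next, visited)
def pvNexts (m n : Int) (a : List (List Int))
    (s : Int × Int × Int × Bool × PySem.Set (Int × Int)) :
    List (Int × Int × Int × Bool × PySem.Set (Int × Int)) :=
  match s with
  | (x, y, ph, up, vis) =>
    pvDirs.filterMap (fun d =>
      let nx := x + d.1
      let ny := y + d.2
      if (0 ≤ nx ∧ nx < m ∧ 0 ≤ ny ∧ ny < n) ∧ ¬ PySem.Set.contains vis (nx, ny) then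
        let h := pvCell a nx ny
        if (if up then decide (ph < h) else decide (h < ph)) then
          some (nx, ny, h, !up, PySem.Set.add vis (nx, ny))
        else none
      else none)

-- B's while loop: count the layers until no state can be extended.  `fuel` only makes
-- the loop structural: the visited set grows by one in-bounds cell per layer, so there
-- are at most m*n layers and the initial fuel m*n+1 is never exhausted.
def pvLoop (m n : Int) (a : List (List Int)) :
    Nat → List (Int × Int × Int × Bool × PySem.Set (Int × Int)) → Int
  | 0, _ => 0
  | fuel + 1, frontier =>
    let nxt := frontier.flatMap (pvNexts m n a)
    if nxt.isEmpty then 0 else 1 + pvLoop m n a fuel nxt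

def solution_alt (m : Int) (n : Int) (a : List (List Int)) : Int :=
  let frontier := (PySem.List.pyRange 0 m 1).flatMap (fun i =>
    (PySem.List.pyRange 0 n 1).flatMap (fun j =>
      let start : PySem.Set (Int × Int) := PySem.Set.ofList [(i, j)]
      let h := pvCell a i j
      [(i, j, h, true, start), (i, j, h, false, start)]))
  pvLoop m n a (m.toNat * n.toNat + 1) frontier

-- ===== PRECONDITION & SPEC =====
-- Pre_ excludes exactly the inputs where Python A raises IndexError: when both loop
-- ranges are non-empty, a must have at least m rows and each of the first m rows at
-- least n entries (every access a[x][y] has 0 ≤ x < m, 0 ≤ y < n).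
def Pre_solution (m : Int) (n : Int) (a : List (List Int)) : Prop :=
  (0 < m ∧ 0 < n) → ((m ≤ (a.length : Int)) ∧ ∀ row ∈ a.take m.toNat, n ≤ (row.length : Int))
instance (m : Int) (n : Int) (a : List (List Int)) : Decidable (Pre_solution m n a) := by
  unfold Pre_solution; infer_instance

def pvWitness_solution : Int × Int × List (List Int) := (2, 2, [[1, 2], [4, 3]])

def Spec_solution (m : Int) (n : Int) (a : List (List Int)) (out : Int) : Prop := out = solution_alt m n a
instance (m : Int) (n : Int) (a : List (List Int)) (out : Int) : Decidable (Spec_solution m n a out) := by unfold Spec_solution; infer_instance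

-- ===== CLAIM (what is proved, stated in full; the proofs are below) =====
def Claim_equal_solution : Prop := ∀ (m : Int) (n : Int) (a : List (List Int)), Dom_solution m n a → Pre_solution m n a → Spec_solution m n a (solution m n a)

-- ===== LEMMAS AND PROOFS =====

-- a foldl whose step never decreases the accumulator never drops below its start
theorem pvFoldl_ge {α : Type} (step : Int → α → Int) (h : ∀ b d, b ≤ step b d) :
    ∀ (ds : List α) (b : Int), b ≤ ds.foldl step b := by
  intro ds
  induction ds with
  | nil => intro b; simp
  | cons d ds ihd => intro b; exact le_trans (h b d) (ihd (step b d))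

-- max over a list of values, folded from 0 (the common accumulator of both programs)
def pvMaxOver {α : Type} (l : List α) (g : α → Int) : Int :=
  l.foldl (fun b x => max b (g x)) 0

theorem pvMaxOver_nonneg {α : Type} (l : List α) (g : α → Int) : 0 ≤ pvMaxOver l g :=
  pvFoldl_ge _ (fun b x => le_max_left b (g x)) l 0

-- folding max-with-g from a nonneg accumulator is a shifted pvMaxOver (literal step)
theorem pvFoldl_maxOver0 {α : Type} (g : α → Int) :
    ∀ (l : List α) (c : Int), 0 ≤ c →
      l.foldl (fun b x => max b (g x)) c = max c (pvMaxOver l g) := by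
  intro l
  induction l with
  | nil => intro c hc; simp [pvMaxOver]; omega
  | cons x xs ih =>
    intro c hc
    have hM : 0 ≤ pvMaxOver xs g := pvMaxOver_nonneg xs g
    have hcons : pvMaxOver (x :: xs) g = max (max 0 (g x)) (pvMaxOver xs g) := by
      unfold pvMaxOver
      simp only [List.foldl_cons]
      exact ih (max 0 (g x)) (by omega)
    simp only [List.foldl_cons]
    rw [ih (max c (g x)) (by omega), hcons]
    omega

theorem pvMaxOver_cons {α : Type} (x : α) (xs : List α) (g : α → Int) :
    pvMaxOver (x :: xs) g = max (max 0 (g x)) (pvMaxOver xs g) := by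
  unfold pvMaxOver
  simp only [List.foldl_cons]
  exact pvFoldl_maxOver0 g xs (max 0 (g x)) (by omega)

-- a fold whose step behaves like max-with-g from any nonneg accumulator is a shifted pvMaxOver
theorem pvFoldl_maxOver {α : Type} (step : Int → α → Int) (g : α → Int)
    (hstep : ∀ b x, 0 ≤ b → step b x = max b (g x)) :
    ∀ (l : List α) (c : Int), 0 ≤ c → l.foldl step c = max c (pvMaxOver l g) := by
  intro l
  induction l with
  | nil => intro c hc; simp [pvMaxOver]; omega
  | cons x xs ih =>
    intro c hc
    have hM : 0 ≤ pvMaxOver xs g := pvMaxOver_nonneg xs g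
    simp only [List.foldl_cons]
    rw [hstep c x hc, ih (max c (g x)) (by omega), pvMaxOver_cons]
    omega

theorem pvMaxOver_append {α : Type} (l₁ l₂ : List α) (g : α → Int) :
    pvMaxOver (l₁ ++ l₂) g = max (pvMaxOver l₁ g) (pvMaxOver l₂ g) := by
  unfold pvMaxOver
  rw [List.foldl_append]
  exact pvFoldl_maxOver0 g l₂ _ (pvMaxOver_nonneg l₁ g)

theorem pvMaxOver_flatMap {α β : Type} (l : List α) (f : α → List β) (g : β → Int) :
    pvMaxOver (l.flatMap f) g = pvMaxOver l (fun x => pvMaxOver (f x) g) := by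
  induction l with
  | nil => simp [pvMaxOver]
  | cons x xs ih =>
    rw [List.flatMap_cons, pvMaxOver_append, pvMaxOver_cons, ih]
    have := pvMaxOver_nonneg (f x) g
    omega

theorem pvMaxOver_congr {α : Type} (l : List α) (g g' : α → Int)
    (h : ∀ x ∈ l, g x = g' x) : pvMaxOver l g = pvMaxOver l g' := by
  unfold pvMaxOver
  apply PySem.List.foldl_congr_mem
  intro b x hx
  rw [h x hx]

theorem pvMaxOver_one_add {α : Type} (g : α → Int) (hg : ∀ x, 0 ≤ g x) :
    ∀ (l : List α), l ≠ [] → pvMaxOver l (fun x => 1 + g x) = 1 + pvMaxOver l g := by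
  intro l
  induction l with
  | nil => intro h; exact absurd rfl h
  | cons x xs ih =>
    intro _
    rw [pvMaxOver_cons, pvMaxOver_cons]
    cases xs with
    | nil => simp [pvMaxOver]; have := hg x; omega
    | cons y ys =>
      rw [ih (by simp)]
      have h1 := hg x
      have h2 := pvMaxOver_nonneg (y :: ys) g
      omega

-- proof-side value-returning DFS: the longest alternating extension from (x, y)
def pvDfsB (m n : Int) (a : List (List Int)) :
    Nat → Int → Int → Int → Bool → PySem.Set (Int × Int) → Int
  | 0, _, _, _, _, _ => 0
  | fuel + 1, x, y, ph, up, vis =>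
    pvDirs.foldl (fun best d =>
      let nx := x + d.1
      let ny := y + d.2
      if (0 ≤ nx ∧ nx < m ∧ 0 ≤ ny ∧ ny < n) ∧ ¬ PySem.Set.contains vis (nx, ny) then
        let ch := pvCell a nx ny
        if (if up then decide (ph < ch) else decide (ch < ph)) then
          max best (1 + pvDfsB m n a fuel nx ny ch (!up) (PySem.Set.add vis (nx, ny)))
        else best
      else best) 0

-- B's dfs is nonnegative
theorem pvDfsB_nonneg (m n : Int) (a : List (List Int)) :
    ∀ (fuel : Nat) (x y ph : Int) (up : Bool) (vis : PySem.Set (Int × Int)),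
      0 ≤ pvDfsB m n a fuel x y ph up vis := by
  intro fuel
  cases fuel with
  | zero => intro x y ph up vis; simp [pvDfsB]
  | succ f =>
    intro x y ph up vis
    rw [pvDfsB]
    apply pvFoldl_ge
    intro b d
    dsimp only
    split_ifs <;> omega

-- the fold of A's dfs (accumulator = the max box) against the fold of B's dfs (accumulator = best)
theorem pvFoldl_key {α : Type} (stepA stepB : Int → α → Int) (steps : Int)
    (hAB : ∀ ms d, steps ≤ ms → stepA ms d = max ms (steps + stepB 0 d))
    (hB : ∀ b d, 0 ≤ b → stepB b d = max b (stepB 0 d)) (hBpos : ∀ d, 0 ≤ stepB 0 d) :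
    ∀ (ds : List α) (ms : Int), steps ≤ ms →
      ds.foldl stepA ms = max ms (steps + ds.foldl stepB 0) := by
  intro ds
  induction ds with
  | nil => intro ms hms; simp; omega
  | cons d ds ihd =>
    intro ms hms
    simp only [List.foldl_cons]
    have hshift : ds.foldl stepB (stepB 0 d) = max (stepB 0 d) (ds.foldl stepB 0) := by
      have : ds.foldl stepB (stepB 0 d) = max (stepB 0 d) (pvMaxOver ds (fun x => stepB 0 x)) := by
        exact pvFoldl_maxOver stepB (fun x => stepB 0 x) (fun b x hb => hB b x hb) ds _ (hBpos d)
      rw [this]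
      have : ds.foldl stepB 0 = max 0 (pvMaxOver ds (fun x => stepB 0 x)) := by
        exact pvFoldl_maxOver stepB (fun x => stepB 0 x) (fun b x hb => hB b x hb) ds 0 le_rfl
      rw [this]
      have := pvMaxOver_nonneg ds (fun x => stepB 0 x)
      have := hBpos d
      omega
    rw [hAB ms d hms, ihd _ (by have := hBpos d; omega), hshift]
    have := hBpos d
    omega

-- THE KEY INVARIANT: A's dfs returns the old box maxed with steps + B's longest extension
theorem pvDfsA_eq (m n : Int) (a : List (List Int)) :
    ∀ (fuel : Nat) (x y ph : Int) (up : Bool) (steps : Int) (vis : PySem.Set (Int × Int)) (ms : Int),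
      pvDfsA m n a fuel x y ph up steps vis ms
        = max ms (steps + pvDfsB m n a fuel x y ph up vis) := by
  intro fuel
  induction fuel with
  | zero => intro x y ph up steps vis ms; simp [pvDfsA, pvDfsB]
  | succ f ih =>
    intro x y ph up steps vis ms
    rw [pvDfsA, pvDfsB]
    dsimp only
    have hBpos : ∀ d : Int × Int, 0 ≤
        (if (0 ≤ x + d.1 ∧ x + d.1 < m ∧ 0 ≤ y + d.2 ∧ y + d.2 < n) ∧
            ¬ PySem.Set.contains vis (x + d.1, y + d.2) then
          if (if up then decide (ph < pvCell a (x + d.1) (y + d.2))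
              else decide (pvCell a (x + d.1) (y + d.2) < ph)) then
            max (0 : Int) (1 + pvDfsB m n a f (x + d.1) (y + d.2) (pvCell a (x + d.1) (y + d.2))
              (!up) (PySem.Set.add vis (x + d.1, y + d.2)))
          else 0
        else 0) := by
      intro d
      have := pvDfsB_nonneg m n a f (x + d.1) (y + d.2) (pvCell a (x + d.1) (y + d.2))
        (!up) (PySem.Set.add vis (x + d.1, y + d.2))
      split_ifs <;> omega
    have key := pvFoldl_key
      (fun ms (d : Int × Int) =>
        if (0 ≤ x + d.1 ∧ x + d.1 < m ∧ 0 ≤ y + d.2 ∧ y + d.2 < n) ∧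
            ¬ PySem.Set.contains vis (x + d.1, y + d.2) then
          if (up && decide (ph < pvCell a (x + d.1) (y + d.2)))
              || (!up && decide (pvCell a (x + d.1) (y + d.2) < ph)) then
            pvDfsA m n a f (x + d.1) (y + d.2) (pvCell a (x + d.1) (y + d.2)) (!up) (steps + 1)
              (PySem.Set.add vis (x + d.1, y + d.2)) ms
          else ms
        else ms)
      (fun best (d : Int × Int) =>
        if (0 ≤ x + d.1 ∧ x + d.1 < m ∧ 0 ≤ y + d.2 ∧ y + d.2 < n) ∧
            ¬ PySem.Set.contains vis (x + d.1, y + d.2) then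
          if (if up then decide (ph < pvCell a (x + d.1) (y + d.2))
              else decide (pvCell a (x + d.1) (y + d.2) < ph)) then
            max best (1 + pvDfsB m n a f (x + d.1) (y + d.2) (pvCell a (x + d.1) (y + d.2))
              (!up) (PySem.Set.add vis (x + d.1, y + d.2)))
          else best
        else best)
      steps
      (by
        intro ms' d hms
        dsimp only
        have hv := pvDfsB_nonneg m n a f (x + d.1) (y + d.2) (pvCell a (x + d.1) (y + d.2))
          (!up) (PySem.Set.add vis (x + d.1, y + d.2))
        have hcond : ((up && decide (ph < pvCell a (x + d.1) (y + d.2)))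
              || (!up && decide (pvCell a (x + d.1) (y + d.2) < ph)))
            = (if up then decide (ph < pvCell a (x + d.1) (y + d.2))
               else decide (pvCell a (x + d.1) (y + d.2) < ph)) := by
          cases up <;> simp
        rw [hcond]
        by_cases h1 : (0 ≤ x + d.1 ∧ x + d.1 < m ∧ 0 ≤ y + d.2 ∧ y + d.2 < n) ∧
            ¬ PySem.Set.contains vis (x + d.1, y + d.2)
        · rw [if_pos h1, if_pos h1]
          by_cases h2 : (if up then decide (ph < pvCell a (x + d.1) (y + d.2))
              else decide (pvCell a (x + d.1) (y + d.2) < ph)) = true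
          · rw [if_pos h2, if_pos h2]
            have hx := ih (x + d.1) (y + d.2) (pvCell a (x + d.1) (y + d.2)) (!up) (steps + 1)
                (PySem.Set.add vis (x + d.1, y + d.2)) ms'
            omega
          · rw [if_neg h2, if_neg h2]
            omega
        · rw [if_neg h1, if_neg h1]
          omega)
      (by
        intro b d hb
        dsimp only
        have hv := pvDfsB_nonneg m n a f (x + d.1) (y + d.2) (pvCell a (x + d.1) (y + d.2))
          (!up) (PySem.Set.add vis (x + d.1, y + d.2))
        split_ifs <;> omega)
      hBpos
      pvDirs (max ms steps) (le_max_right _ _)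
    rw [key]
    have h0 := pvFoldl_ge
      (fun best (d : Int × Int) =>
        if (0 ≤ x + d.1 ∧ x + d.1 < m ∧ 0 ≤ y + d.2 ∧ y + d.2 < n) ∧
            ¬ PySem.Set.contains vis (x + d.1, y + d.2) then
          if (if up then decide (ph < pvCell a (x + d.1) (y + d.2))
              else decide (pvCell a (x + d.1) (y + d.2) < ph)) then
            max best (1 + pvDfsB m n a f (x + d.1) (y + d.2) (pvCell a (x + d.1) (y + d.2))
              (!up) (PySem.Set.add vis (x + d.1, y + d.2)))
          else best
        else best)
      (fun b d => by dsimp only; split_ifs <;> omega) pvDirs (0 : Int)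
    generalize hX : List.foldl _ (0 : Int) pvDirs = X at h0 ⊢
    omega

-- folding over a filterMap is folding over the source with the selector inlined
theorem pvFoldl_filterMap {α β γ : Type} (f : α → Option β) (g : γ → β → γ) :
    ∀ (l : List α) (b : γ),
      (l.filterMap f).foldl g b
        = l.foldl (fun b x => match f x with | some y => g b y | none => b) b := by
  intro l
  induction l with
  | nil => intro b; rfl
  | cons x xs ih =>
    intro b
    cases hfx : f x <;> simp [hfx, ih]

-- pvDfsB is the per-state value of the successor-list DFS used by B's layers
theorem pvDfsB_nexts (m n : Int) (a : List (List Int)) :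
    ∀ (fuel : Nat) (x y ph : Int) (up : Bool) (vis : PySem.Set (Int × Int)),
      pvDfsB m n a (fuel + 1) x y ph up vis
        = pvMaxOver (pvNexts m n a (x, y, ph, up, vis))
            (fun t => 1 + pvDfsB m n a fuel t.1 t.2.1 t.2.2.1 t.2.2.2.1 t.2.2.2.2) := by
  intro fuel x y ph up vis
  rw [pvDfsB]
  unfold pvMaxOver pvNexts
  rw [pvFoldl_filterMap]
  apply PySem.List.foldl_congr_mem
  intro b d _
  dsimp only
  by_cases h1 : (0 ≤ x + d.1 ∧ x + d.1 < m ∧ 0 ≤ y + d.2 ∧ y + d.2 < n) ∧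
      ¬ PySem.Set.contains vis (x + d.1, y + d.2)
  · rw [if_pos h1, if_pos h1]
    by_cases h2 : (if up then decide (ph < pvCell a (x + d.1) (y + d.2))
        else decide (pvCell a (x + d.1) (y + d.2) < ph)) = true
    · rw [if_pos h2, if_pos h2]
    · rw [if_neg h2, if_neg h2]
  · rw [if_neg h1, if_neg h1]

-- B's layer count equals the max over the frontier of the value-returning DFS
theorem pvLoop_eq (m n : Int) (a : List (List Int)) :
    ∀ (fuel : Nat) (frontier : List (Int × Int × Int × Bool × PySem.Set (Int × Int))),
      pvLoop m n a fuel frontier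
        = pvMaxOver frontier
            (fun t => pvDfsB m n a fuel t.1 t.2.1 t.2.2.1 t.2.2.2.1 t.2.2.2.2) := by
  intro fuel
  induction fuel with
  | zero =>
    intro frontier
    rw [pvLoop]
    induction frontier with
    | nil => simp [pvMaxOver]
    | cons x xs ih => rw [pvMaxOver_cons, ← ih]; simp [pvDfsB]
  | succ f ih =>
    intro frontier
    rw [pvLoop]
    have hrw : pvMaxOver frontier
        (fun t => pvDfsB m n a (f + 1) t.1 t.2.1 t.2.2.1 t.2.2.2.1 t.2.2.2.2)
        = pvMaxOver (frontier.flatMap (pvNexts m n a))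
            (fun t => 1 + pvDfsB m n a f t.1 t.2.1 t.2.2.1 t.2.2.2.1 t.2.2.2.2) := by
      rw [pvMaxOver_flatMap]
      apply pvMaxOver_congr
      intro t _
      exact pvDfsB_nexts m n a f t.1 t.2.1 t.2.2.1 t.2.2.2.1 t.2.2.2.2
    rw [hrw]
    by_cases hN : (frontier.flatMap (pvNexts m n a)).isEmpty = true
    · rw [if_pos hN]
      rw [List.isEmpty_iff] at hN
      simp [hN, pvMaxOver]
    · rw [if_neg hN]
      rw [ih]
      apply Eq.symm
      apply pvMaxOver_one_add
      · intro t; exact pvDfsB_nonneg m n a f t.1 t.2.1 t.2.2.1 t.2.2.2.1 t.2.2.2.2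
      · intro h; rw [h] at hN; exact hN rfl

-- ===== VERDICT (by name: the statement is the Claim_ definition above) =====
theorem solution_spec : Claim_equal_solution := by
  intro m n a _ _
  show solution m n a = solution_alt m n a
  unfold solution solution_alt
  rw [pvLoop_eq, pvMaxOver_flatMap]
  -- the A side: fold of the mutable max box = max over cells of the two dfs values
  have houter : (PySem.List.pyRange 0 m 1).foldl (fun ms i =>
      (PySem.List.pyRange 0 n 1).foldl (fun ms j =>
        let vis : PySem.Set (Int × Int) := PySem.Set.ofList [(i, j)]
        let h := pvCell a i j
        let ms := pvDfsA m n a (m.toNat * n.toNat + 1) i j h true 0 vis ms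
        pvDfsA m n a (m.toNat * n.toNat + 1) i j h false 0 vis ms) ms) 0
      = max 0 (pvMaxOver (PySem.List.pyRange 0 m 1) (fun i =>
          pvMaxOver (PySem.List.pyRange 0 n 1) (fun j =>
            max (pvDfsB m n a (m.toNat * n.toNat + 1) i j (pvCell a i j) true
                  (PySem.Set.ofList [(i, j)]))
                (pvDfsB m n a (m.toNat * n.toNat + 1) i j (pvCell a i j) false
                  (PySem.Set.ofList [(i, j)]))))) := by
    apply pvFoldl_maxOver
    · intro ms i hms
      apply pvFoldl_maxOver
      · intro ms' j hms'
        dsimp only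
        rw [pvDfsA_eq, pvDfsA_eq]
        omega
      · exact hms
    · exact le_rfl
  rw [houter]
  have hnn := pvMaxOver_nonneg (PySem.List.pyRange 0 m 1) (fun i =>
      pvMaxOver (PySem.List.pyRange 0 n 1) (fun j =>
        max (pvDfsB m n a (m.toNat * n.toNat + 1) i j (pvCell a i j) true
              (PySem.Set.ofList [(i, j)]))
            (pvDfsB m n a (m.toNat * n.toNat + 1) i j (pvCell a i j) false
              (PySem.Set.ofList [(i, j)]))))
  rw [max_eq_right hnn]
  apply pvMaxOver_congr
  intro i _
  rw [pvMaxOver_flatMap]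
  apply pvMaxOver_congr
  intro j _
  dsimp only
  rw [pvMaxOver_cons, pvMaxOver_cons]
  have hT := pvDfsB_nonneg m n a (m.toNat * n.toNat + 1) i j (pvCell a i j) true
    (PySem.Set.ofList [(i, j)])
  have hF := pvDfsB_nonneg m n a (m.toNat * n.toNat + 1) i j (pvCell a i j) false
    (PySem.Set.ofList [(i, j)])
  simp [pvMaxOver]
  omega
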